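-- pv_equiv track=rewrite | github.com/Uzma90/AI-Fashion-Stylist | fashion_stylist_with_uploads.py | generate_outfit
-- ===== SOURCE A (Python) =====
-- def generate_outfit(items, mood, occasion):
--     """Generate outfit based on items, mood, and occasion"""
--     # Simple rule-based outfit generation
--     outfit = {
--         "top": "Choose a comfortable top",
--         "bottom": "Select appropriate bottoms",
--         "shoes": "Pick suitable shoes",
--         "accessories": "Add finishing touches"
--     }
--
--     # Find items by type
--     tops = [item for item in items if item['item_type'] in ['top', 'dress']]
--     bottoms = [item for item in items if item['item_type'] == 'bottom']
--     shoes = [item for item in items if item['item_type'] == 'shoes']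
--     accessories = [item for item in items if item['item_type'] == 'accessories']
--
--     # Select items based on mood and occasion
--     if tops:
--         if mood == "formal":
--             formal_tops = [t for t in tops if t['style'] == 'formal']
--             if formal_tops:
--                 outfit["top"] = f"{formal_tops[0]['color']} {formal_tops[0]['item_type']} ({formal_tops[0]['style']})"
--             else:
--                 outfit["top"] = f"{tops[0]['color']} {tops[0]['item_type']} - dress it up with accessories"
--         else:
--             outfit["top"] = f"{tops[0]['color']} {tops[0]['item_type']} ({tops[0]['style']})"
--
--     if bottoms:
--         outfit["bottom"] = f"{bottoms[0]['color']} {bottoms[0]['item_type']} ({bottoms[0]['style']})"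
--
--     if shoes:
--         outfit["shoes"] = f"{shoes[0]['color']} {shoes[0]['item_type']} ({shoes[0]['style']})"
--
--     if accessories:
--         outfit["accessories"] = f"{accessories[0]['color']} {accessories[0]['item_type']} ({accessories[0]['style']})"
--
--     # Add styling tips based on mood
--     if mood == "formal":
--         outfit["styling_tips"] = "Opt for classic pieces in neutral colors. Ensure everything is well-fitted and polished. Add a blazer or structured jacket for extra sophistication."
--     elif mood == "casual":
--         outfit["styling_tips"] = "Keep it relaxed and comfortable. Mix textures and add personal touches. Don't be afraid to layer pieces for a more interesting look."
--     elif mood == "party":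
--         outfit["styling_tips"] = "Go bold with colors and statement pieces. Don't forget to accessorize! Add some sparkle or metallic accents to make it party-ready."
--     elif mood == "romantic":
--         outfit["styling_tips"] = "Choose soft, flowing fabrics and romantic colors. Add delicate accessories and consider layering for a dreamy look."
--     elif mood == "edgy":
--         outfit["styling_tips"] = "Mix textures and add bold accessories. Don't be afraid to break fashion rules and make a statement."
--     else:
--         outfit["styling_tips"] = "Choose pieces that make you feel confident and comfortable. Trust your instincts and add your personal touch."
--
--     outfit["reasoning"] = f"This outfit is designed for a {mood} mood and {occasion} occasion. The selected pieces work together to create a cohesive look that matches your desired style."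
--
--     return outfit
-- ===== SOURCE B (Python) =====
-- def generate_outfit(items, mood, occasion):
--     """Generate outfit based on items, mood, and occasion"""
--     # One pass over items: record the first item of each category and the
--     # first formal top (style only read for tops when mood == 'formal').
--     top = bottom = shoes = accessories = formal_top = None
--     for item in items:
--         t = item['item_type']
--         if t in ('top', 'dress'):
--             if top is None:
--                 top = item
--             if mood == 'formal' and item['style'] == 'formal' and formal_top is None:
--                 formal_top = item
--         elif t == 'bottom':
--             if bottom is None:
--                 bottom = item
--         elif t == 'shoes':
--             if shoes is None:
--                 shoes = item
--         elif t == 'accessories':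
--             if accessories is None:
--                 accessories = item
--
--     def fmt(it):
--         return f"{it['color']} {it['item_type']} ({it['style']})"
--
--     if top is None:
--         top_line = "Choose a comfortable top"
--     elif mood == 'formal':
--         if formal_top is not None:
--             top_line = fmt(formal_top)
--         else:
--             top_line = f"{top['color']} {top['item_type']} - dress it up with accessories"
--     else:
--         top_line = fmt(top)
--
--     tips = {
--         "formal": "Opt for classic pieces in neutral colors. Ensure everything is well-fitted and polished. Add a blazer or structured jacket for extra sophistication.",
--         "casual": "Keep it relaxed and comfortable. Mix textures and add personal touches. Don't be afraid to layer pieces for a more interesting look.",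
--         "party": "Go bold with colors and statement pieces. Don't forget to accessorize! Add some sparkle or metallic accents to make it party-ready.",
--         "romantic": "Choose soft, flowing fabrics and romantic colors. Add delicate accessories and consider layering for a dreamy look.",
--         "edgy": "Mix textures and add bold accessories. Don't be afraid to break fashion rules and make a statement.",
--     }
--
--     return {
--         "top": top_line,
--         "bottom": fmt(bottom) if bottom is not None else "Select appropriate bottoms",
--         "shoes": fmt(shoes) if shoes is not None else "Pick suitable shoes",
--         "accessories": fmt(accessories) if accessories is not None else "Add finishing touches",
--         "styling_tips": tips.get(mood, "Choose pieces that make you feel confident and comfortable. Trust your instincts and add your personal touch."),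
--         "reasoning": f"This outfit is designed for a {mood} mood and {occasion} occasion. The selected pieces work together to create a cohesive look that matches your desired style.",
--     }
-- ===== Notes on version B (the rewrite author's own statement) =====
-- stated objective: alternative
-- what changed: Replaces A's four separate filter passes over items (plus a fifth filtered pass for formal tops) and in-place dict updates by a single fold that records the first item of each category and the first formal top, then assembles the result dict directly.
import Mathlib
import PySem

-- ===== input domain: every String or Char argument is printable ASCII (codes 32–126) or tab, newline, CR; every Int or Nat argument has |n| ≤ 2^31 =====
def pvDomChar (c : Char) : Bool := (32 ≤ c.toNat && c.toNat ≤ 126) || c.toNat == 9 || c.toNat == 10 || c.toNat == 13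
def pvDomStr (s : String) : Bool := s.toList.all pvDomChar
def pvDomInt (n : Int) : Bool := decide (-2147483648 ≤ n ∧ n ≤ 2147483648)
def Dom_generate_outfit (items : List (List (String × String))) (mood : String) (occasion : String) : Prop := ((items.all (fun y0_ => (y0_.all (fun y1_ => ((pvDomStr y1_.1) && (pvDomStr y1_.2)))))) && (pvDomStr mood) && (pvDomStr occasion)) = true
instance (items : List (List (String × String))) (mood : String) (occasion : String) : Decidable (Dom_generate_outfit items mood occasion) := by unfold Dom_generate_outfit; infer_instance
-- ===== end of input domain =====

-- B replaces A's four filter passes over `items` by a single fold recording the first item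
-- of each category (and the first formal top), then assembles the same dict; return value only.

-- shared helpers: Python dict lookup on an association list (first match)
def pvGet? (it : List (String × String)) (k : String) : Option String :=
  (it.find? (fun p => p.1 == k)).map (·.2)

def pvGetD (it : List (String × String)) (k : String) : String :=
  (pvGet? it k).getD ""

-- ===== PORT A =====
def generate_outfit (items : List (List (String × String))) (mood : String) (occasion : String) : List (String × String) :=
  let outfit : PySem.Dict String String := PySem.Dict.ofList
    [("top", "Choose a comfortable top"),
     ("bottom", "Select appropriate bottoms"),
     ("shoes", "Pick suitable shoes"),
     ("accessories", "Add finishing touches")]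
  let tops := items.filter (fun item => pvGetD item "item_type" == "top" || pvGetD item "item_type" == "dress")
  let bottoms := items.filter (fun item => pvGetD item "item_type" == "bottom")
  let shoesL := items.filter (fun item => pvGetD item "item_type" == "shoes")
  let accs := items.filter (fun item => pvGetD item "item_type" == "accessories")
  let outfit :=
    match tops with
    | [] => outfit
    | t0 :: _ =>
      if mood == "formal" then
        match tops.filter (fun t => pvGetD t "style" == "formal") with
        | f0 :: _ => outfit.insert "top" (pvGetD f0 "color" ++ " " ++ pvGetD f0 "item_type" ++ " (" ++ pvGetD f0 "style" ++ ")")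
        | [] => outfit.insert "top" (pvGetD t0 "color" ++ " " ++ pvGetD t0 "item_type" ++ " - dress it up with accessories")
      else
        outfit.insert "top" (pvGetD t0 "color" ++ " " ++ pvGetD t0 "item_type" ++ " (" ++ pvGetD t0 "style" ++ ")")
  let outfit :=
    match bottoms with
    | [] => outfit
    | b0 :: _ => outfit.insert "bottom" (pvGetD b0 "color" ++ " " ++ pvGetD b0 "item_type" ++ " (" ++ pvGetD b0 "style" ++ ")")
  let outfit :=
    match shoesL with
    | [] => outfit
    | s0 :: _ => outfit.insert "shoes" (pvGetD s0 "color" ++ " " ++ pvGetD s0 "item_type" ++ " (" ++ pvGetD s0 "style" ++ ")")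
  let outfit :=
    match accs with
    | [] => outfit
    | a0 :: _ => outfit.insert "accessories" (pvGetD a0 "color" ++ " " ++ pvGetD a0 "item_type" ++ " (" ++ pvGetD a0 "style" ++ ")")
  let outfit := outfit.insert "styling_tips"
    (if mood == "formal" then "Opt for classic pieces in neutral colors. Ensure everything is well-fitted and polished. Add a blazer or structured jacket for extra sophistication."
     else if mood == "casual" then "Keep it relaxed and comfortable. Mix textures and add personal touches. Don't be afraid to layer pieces for a more interesting look."
     else if mood == "party" then "Go bold with colors and statement pieces. Don't forget to accessorize! Add some sparkle or metallic accents to make it party-ready."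
     else if mood == "romantic" then "Choose soft, flowing fabrics and romantic colors. Add delicate accessories and consider layering for a dreamy look."
     else if mood == "edgy" then "Mix textures and add bold accessories. Don't be afraid to break fashion rules and make a statement."
     else "Choose pieces that make you feel confident and comfortable. Trust your instincts and add your personal touch.")
  let outfit := outfit.insert "reasoning"
    ("This outfit is designed for a " ++ mood ++ " mood and " ++ occasion ++ " occasion. The selected pieces work together to create a cohesive look that matches your desired style.")
  outfit.items

-- ===== PORT B =====
-- B-side helpers
def pvFmt (it : List (String × String)) : String :=
  pvGetD it "color" ++ " " ++ pvGetD it "item_type" ++ " (" ++ pvGetD it "style" ++ ")"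

def pvTips : List (String × String) :=
  [("formal", "Opt for classic pieces in neutral colors. Ensure everything is well-fitted and polished. Add a blazer or structured jacket for extra sophistication."),
   ("casual", "Keep it relaxed and comfortable. Mix textures and add personal touches. Don't be afraid to layer pieces for a more interesting look."),
   ("party", "Go bold with colors and statement pieces. Don't forget to accessorize! Add some sparkle or metallic accents to make it party-ready."),
   ("romantic", "Choose soft, flowing fabrics and romantic colors. Add delicate accessories and consider layering for a dreamy look."),
   ("edgy", "Mix textures and add bold accessories. Don't be afraid to break fashion rules and make a statement.")]

def pvStepB (mood : String)
    (st : Option (List (String × String)) × Option (List (String × String)) × Option (List (String × String)) × Option (List (String × String)) × Option (List (String × String)))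
    (item : List (String × String)) :
    Option (List (String × String)) × Option (List (String × String)) × Option (List (String × String)) × Option (List (String × String)) × Option (List (String × String)) :=
  let t := pvGetD item "item_type"
  if t == "top" || t == "dress" then
    let top := if st.1.isNone then some item else st.1
    let ft := if mood == "formal" && pvGetD item "style" == "formal" && st.2.2.2.2.isNone then some item else st.2.2.2.2
    (top, st.2.1, st.2.2.1, st.2.2.2.1, ft)
  else if t == "bottom" then
    (st.1, if st.2.1.isNone then some item else st.2.1, st.2.2.1, st.2.2.2.1, st.2.2.2.2)
  else if t == "shoes" then
    (st.1, st.2.1, if st.2.2.1.isNone then some item else st.2.2.1, st.2.2.2.1, st.2.2.2.2)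
  else if t == "accessories" then
    (st.1, st.2.1, st.2.2.1, if st.2.2.2.1.isNone then some item else st.2.2.2.1, st.2.2.2.2)
  else st

def generate_outfit_alt (items : List (List (String × String))) (mood : String) (occasion : String) : List (String × String) :=
  let st := items.foldl (pvStepB mood) (none, none, none, none, none)
  let topLine :=
    match st.1 with
    | none => "Choose a comfortable top"
    | some top =>
      if mood == "formal" then
        match st.2.2.2.2 with
        | some ft => pvFmt ft
        | none => pvGetD top "color" ++ " " ++ pvGetD top "item_type" ++ " - dress it up with accessories"
      else pvFmt top
  [("top", topLine),
   ("bottom", match st.2.1 with | some b => pvFmt b | none => "Select appropriate bottoms"),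
   ("shoes", match st.2.2.1 with | some s => pvFmt s | none => "Pick suitable shoes"),
   ("accessories", match st.2.2.2.1 with | some a => pvFmt a | none => "Add finishing touches"),
   ("styling_tips", (pvGet? pvTips mood).getD "Choose pieces that make you feel confident and comfortable. Trust your instincts and add your personal touch."),
   ("reasoning", "This outfit is designed for a " ++ mood ++ " mood and " ++ occasion ++ " occasion. The selected pieces work together to create a cohesive look that matches your desired style.")]

-- ===== PRECONDITION & SPEC =====
def pvIsTop (it : List (String × String)) : Bool :=
  pvGetD it "item_type" == "top" || pvGetD it "item_type" == "dress"

-- Pre_ excludes exactly the inputs on which Python A raises KeyError: an item without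
-- 'item_type'; with mood 'formal', a top without 'style'; or a selected first item of a
-- category missing the 'color'/'style' keys its message reads.
def Pre_generate_outfit (items : List (List (String × String))) (mood : String) (occasion : String) : Prop :=
  (∀ it ∈ items, (pvGet? it "item_type").isSome = true) ∧
  (mood = "formal" → ∀ it ∈ items, pvIsTop it = true → (pvGet? it "style").isSome = true) ∧
  ((items.filter pvIsTop).head?.all (fun t0 =>
    if mood == "formal" then
      (match ((items.filter pvIsTop).filter (fun t => pvGetD t "style" == "formal")).head? with
       | some f0 => (pvGet? f0 "color").isSome
       | none => (pvGet? t0 "color").isSome)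
    else ((pvGet? t0 "color").isSome && (pvGet? t0 "style").isSome)) = true) ∧
  ((items.filter (fun it => pvGetD it "item_type" == "bottom")).head?.all (fun b0 =>
    (pvGet? b0 "color").isSome && (pvGet? b0 "style").isSome) = true) ∧
  ((items.filter (fun it => pvGetD it "item_type" == "shoes")).head?.all (fun s0 =>
    (pvGet? s0 "color").isSome && (pvGet? s0 "style").isSome) = true) ∧
  ((items.filter (fun it => pvGetD it "item_type" == "accessories")).head?.all (fun a0 =>
    (pvGet? a0 "color").isSome && (pvGet? a0 "style").isSome) = true)
instance (items : List (List (String × String))) (mood : String) (occasion : String) : Decidable (Pre_generate_outfit items mood occasion) := by unfold Pre_generate_outfit; infer_instance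

def pvWitness_generate_outfit : (List (List (String × String))) × String × String :=
  ([[("item_type", "top"), ("style", "casual"), ("color", "red")]], "casual", "party")

def Spec_generate_outfit (items : List (List (String × String))) (mood : String) (occasion : String) (out : List (String × String)) : Prop := out = generate_outfit_alt items mood occasion
instance (items : List (List (String × String))) (mood : String) (occasion : String) (out : List (String × String)) : Decidable (Spec_generate_outfit items mood occasion out) := by unfold Spec_generate_outfit; infer_instance

-- ===== CLAIM (what is proved, stated in full; the proofs are below) =====
def Claim_equal_generate_outfit : Prop := ∀ (items : List (List (String × String))) (mood : String) (occasion : String), Dom_generate_outfit items mood occasion → Pre_generate_outfit items mood occasion → Spec_generate_outfit items mood occasion (generate_outfit items mood occasion)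

-- ===== LEMMAS AND PROOFS =====

theorem or_ite_isNone {α : Type} (o : Option α) (x : α) :
    (if o.isNone then some x else o) = o.or (some x) := by cases o <;> rfl

theorem or_ite_guard {α : Type} (o : Option α) (c : Bool) (x : α) :
    (if c && o.isNone then some x else o) = o.or (if c then some x else none) := by
  cases o <;> cases c <;> rfl

theorem foldB_spec (mood : String) (items : List (List (String × String))) (st) :
    items.foldl (pvStepB mood) st =
      (st.1.or ((items.filter (fun item => pvGetD item "item_type" == "top" || pvGetD item "item_type" == "dress")).head?),
       st.2.1.or ((items.filter (fun it => pvGetD it "item_type" == "bottom")).head?),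
       st.2.2.1.or ((items.filter (fun it => pvGetD it "item_type" == "shoes")).head?),
       st.2.2.2.1.or ((items.filter (fun it => pvGetD it "item_type" == "accessories")).head?),
       st.2.2.2.2.or (if mood == "formal"
         then ((items.filter (fun item => pvGetD item "item_type" == "top" || pvGetD item "item_type" == "dress")).filter (fun t => pvGetD t "style" == "formal")).head?
         else none)) := by
  induction items generalizing st with
  | nil => cases st with | mk a r => cases r with | mk b r => cases r with | mk c r => cases r with | mk d e =>
           simp [List.foldl]
  | cons it rest ih =>
    obtain ⟨a, b, c, d, e⟩ := st
    rw [List.foldl_cons, ih]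
    by_cases h1 : (pvGetD it "item_type" == "top" || pvGetD it "item_type" == "dress") = true
    · have ht : pvGetD it "item_type" = "top" ∨ pvGetD it "item_type" = "dress" := by simpa using h1
      by_cases hm : (mood == "formal") = true <;>
      by_cases hs : (pvGetD it "style" == "formal") = true <;>
      rcases ht with ht | ht <;>
        simp [pvStepB, pvIsTop, ht, hm, hs, List.filter_cons, or_ite_isNone, or_ite_guard,
          Option.or_assoc] <;>
        cases a <;> cases e <;> simp
    · by_cases h2 : (pvGetD it "item_type" == "bottom") = true
      · have hb : pvGetD it "item_type" = "bottom" := by simpa using h2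
        simp [pvStepB, pvIsTop, hb, List.filter_cons, or_ite_isNone, Option.or_assoc] <;>
        cases b <;> simp
      · by_cases h3 : (pvGetD it "item_type" == "shoes") = true
        · have hsh : pvGetD it "item_type" = "shoes" := by simpa using h3
          simp [pvStepB, pvIsTop, hsh, List.filter_cons, or_ite_isNone, Option.or_assoc] <;>
        cases c <;> simp
        · by_cases h4 : (pvGetD it "item_type" == "accessories") = true
          · have ha : pvGetD it "item_type" = "accessories" := by simpa using h4
            simp [pvStepB, pvIsTop, ha, List.filter_cons, or_ite_isNone, Option.or_assoc] <;>
        cases d <;> simp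
          · simp [pvStepB, pvIsTop, h1, h2, h3, h4, List.filter_cons]

theorem tips_eq (mood : String) :
    (if mood == "formal" then "Opt for classic pieces in neutral colors. Ensure everything is well-fitted and polished. Add a blazer or structured jacket for extra sophistication."
     else if mood == "casual" then "Keep it relaxed and comfortable. Mix textures and add personal touches. Don't be afraid to layer pieces for a more interesting look."
     else if mood == "party" then "Go bold with colors and statement pieces. Don't forget to accessorize! Add some sparkle or metallic accents to make it party-ready."
     else if mood == "romantic" then "Choose soft, flowing fabrics and romantic colors. Add delicate accessories and consider layering for a dreamy look."
     else if mood == "edgy" then "Mix textures and add bold accessories. Don't be afraid to break fashion rules and make a statement."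
     else "Choose pieces that make you feel confident and comfortable. Trust your instincts and add your personal touch.") =
    (pvGet? pvTips mood).getD "Choose pieces that make you feel confident and comfortable. Trust your instincts and add your personal touch." := by
  by_cases h1 : mood = "formal" <;> by_cases h2 : mood = "casual" <;> by_cases h3 : mood = "party" <;>
    by_cases h4 : mood = "romantic" <;> by_cases h5 : mood = "edgy" <;>
    try simp_all [pvTips, pvGet?, List.find?]
  all_goals
    have e1 : ("formal" == mood) = false := by rw [beq_eq_false_iff_ne]; exact fun h => h1 h.symm
    have e2 : ("casual" == mood) = false := by rw [beq_eq_false_iff_ne]; exact fun h => h2 h.symm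
    have e3 : ("party" == mood) = false := by rw [beq_eq_false_iff_ne]; exact fun h => h3 h.symm
    have e4 : ("romantic" == mood) = false := by rw [beq_eq_false_iff_ne]; exact fun h => h4 h.symm
    have e5 : ("edgy" == mood) = false := by rw [beq_eq_false_iff_ne]; exact fun h => h5 h.symm
    simp [e1, e2, e3, e4, e5]

set_option maxHeartbeats 2000000 in
theorem generate_outfit_spec : Claim_equal_generate_outfit := by
  intro items mood occasion _ _
  unfold Spec_generate_outfit generate_outfit generate_outfit_alt
  rw [foldB_spec, tips_eq]
  simp only [Option.none_or, pvFmt]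
  by_cases hm : (mood == "formal") = true <;>
    simp only [hm, if_true, Bool.false_eq_true, if_false] <;>
    cases hf : (items.filter (fun item => pvGetD item "item_type" == "top" || pvGetD item "item_type" == "dress")).filter (fun t => pvGetD t "style" == "formal") <;>
    cases htop : items.filter (fun item => pvGetD item "item_type" == "top" || pvGetD item "item_type" == "dress") <;>
    cases hb : items.filter (fun item => pvGetD item "item_type" == "bottom") <;>
    cases hs : items.filter (fun item => pvGetD item "item_type" == "shoes") <;>
    cases ha : items.filter (fun item => pvGetD item "item_type" == "accessories") <;>
    rfl
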